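-- pv_equiv track=rewrite | github.com/Office-Stapler/truth_table | generate_numberinput.py | generate
-- ===== SOURCE A (Python) =====
-- def generate(n : int) -> dict:
--     """
--     Generates all the number inputs for n seperate variables.
--     n can NOT be > 26.
--     @param an integer n that is the number of different variables.
--     @returns a dictionary that contains all the possible combinations for
--     each letter. (A->(A + n))
--     """
--     if n > 26:
--         raise ValueError('Number is too large.')
--     letters = generate_letters(n)
--     keys = list(letters.keys())
--     for index, letter in enumerate(reversed(keys)):
--         for i in range(2 ** n):
--            letters[letter].append(1 if (i % 2**(index+1) >= 2**index) else 0)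
--     return letters
--
-- def generate_letters(n: int) -> dict:
--     """
--     Generates all the letters for n variables (starts at A-> A+n in the alphabet).
--     @param An integer n, number of different variables.
--     @returns a dictionary that contains all the letters each initialised with
--     an empty list.
--     """
--     start = 'A'
--     dic = {}
--     for i in range(n):
--         dic[chr(ord(start) + i)] = []
--     return dic
-- ===== SOURCE B (Python) =====
-- def generate(n: int) -> dict:
--     """
--     Generates all the number inputs for n seperate variables.
--     n can NOT be > 26.
--     """
--     if n > 26:
--         raise ValueError('Number is too large.')
--     keys = [chr(ord('A') + i) for i in range(n)]
--     return dict(zip(keys, _columns(len(keys))))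
--
--
-- def _columns(k: int) -> list:
--     """Truth-table columns for k variables, MSB (column 0) first, built by
--     doubling: the first column is half zeros then half ones; every later
--     column is the corresponding column for k-1 variables repeated twice."""
--     if k == 0:
--         return []
--     half = 2 ** (k - 1)
--     return [[0] * half + [1] * half] + [col + col for col in _columns(k - 1)]
-- ===== Notes on version B (the rewrite author's own statement) =====
-- stated objective: alternative
-- what changed: B replaces A's per-column modular bit formula (for each letter, loop over all 2^n rows testing i % 2**(index+1) >= 2**index) with a recursive doubling construction: the column list for k variables is [half zeros ++ half ones] plus the k-1-variable columns each repeated twice, then zipped with the letters.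
import Mathlib
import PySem

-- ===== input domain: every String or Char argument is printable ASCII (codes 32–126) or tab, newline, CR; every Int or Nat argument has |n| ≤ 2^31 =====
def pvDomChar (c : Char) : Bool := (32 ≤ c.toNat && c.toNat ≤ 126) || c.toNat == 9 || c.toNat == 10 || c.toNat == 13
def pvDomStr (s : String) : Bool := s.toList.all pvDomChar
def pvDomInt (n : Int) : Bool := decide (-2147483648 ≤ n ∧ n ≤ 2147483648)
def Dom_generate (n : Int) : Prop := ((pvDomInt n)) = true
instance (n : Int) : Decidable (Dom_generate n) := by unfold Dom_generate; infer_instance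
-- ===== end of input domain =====

-- B builds each truth-table column once by recursive doubling (first column = half 0s then half 1s,
-- the rest are the (n-1)-variable columns each repeated twice) instead of A's per-column modular bit formula.

-- ===== PORT A =====
-- chr(ord('A') + i): exact for every i the loops reach (0 ≤ i < n ≤ 26)
def pvLetter (i : Int) : String := String.ofList [Char.ofNat (65 + i).toNat]

def generate_letters (n : Int) : PySem.Dict String (List Int) :=
  (PySem.List.pyRange 0 n 1).foldl
    (fun d i => d.insert (pvLetter i) ([] : List Int)) PySem.Dict.empty

-- 2 ** n / 2 ** (index+1) / 2 ** index ported with .toNat exponents: every exponent is ≥ 0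
-- whenever the body is evaluated (for n ≤ 0 the key list is empty and the loops never run)
def generate (n : Int) : List (String × List Int) :=
  let letters := generate_letters n
  let keys := letters.keys
  ((PySem.List.enumerate keys.reverse 0).foldl
    (fun d p =>
      (PySem.List.pyRange 0 ((2:Int) ^ n.toNat) 1).foldl
        (fun d i => d.modify p.2 []
          (fun l => l ++
            [if (2:Int) ^ p.1.toNat ≤ PySem.Int.mod i ((2:Int) ^ (p.1 + 1).toNat) then (1:Int) else 0])) d)
    letters).items

-- ===== PORT B =====
def pvColumns : Nat → List (List Int)
  | 0 => []
  | k + 1 =>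
    (PySem.List.pyRepeat [(0:Int)] ((2:Int) ^ k) ++ PySem.List.pyRepeat [(1:Int)] ((2:Int) ^ k))
      :: (pvColumns k).map (fun col => col ++ col)

def generate_alt (n : Int) : List (String × List Int) :=
  let keys := (PySem.List.pyRange 0 n 1).map pvLetter
  keys.zip (pvColumns keys.length)

-- ===== PRECONDITION & SPEC =====
-- Pre_ excludes exactly n > 26, where the Python A raises ValueError('Number is too large.')
def Pre_generate (n : Int) : Prop := n ≤ 26
instance (n : Int) : Decidable (Pre_generate n) := by unfold Pre_generate; infer_instance
def pvWitness_generate : Int := 3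

def Spec_generate (n : Int) (out : List (String × List Int)) : Prop := out = generate_alt n
instance (n : Int) (out : List (String × List Int)) : Decidable (Spec_generate n out) := by unfold Spec_generate; infer_instance

-- ===== CLAIM (what is proved, stated in full; the proofs are below) =====
def Claim_equal_generate : Prop := ∀ (n : Int), Dom_generate n → Pre_generate n → Spec_generate n (generate n)

-- ===== LEMMAS AND PROOFS =====

-- name for the bit expression A appends for row i of the column with reversed index idx
def gbit : Int → Int → Int := fun idx i =>
  if (2:Int) ^ idx.toNat ≤ PySem.Int.mod i ((2:Int) ^ (idx + 1).toNat) then 1 else 0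

def natBit (s k : Nat) : Int := if 2 ^ s ≤ k % 2 ^ (s + 1) then 1 else 0

def natCol (s len : Nat) : List Int := (List.range len).map (natBit s)

lemma pvColumns_length (m : Nat) : (pvColumns m).length = m := by
  induction m with
  | zero => rfl
  | succ k ih => simp [pvColumns, ih]

lemma letter_inj (a b : Nat) (ha : a < 26) (hb : b < 26) :
    pvLetter a = pvLetter b → a = b := by
  intro h1
  have h2 : Char.ofNat (65 + a) = Char.ofNat (65 + b) := by
    have ha' : (65 + (a:Int)).toNat = 65 + a := by omega
    have hb' : (65 + (b:Int)).toNat = 65 + b := by omega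
    have := congrArg String.toList h1
    simpa [pvLetter, ha', hb'] using this
  have := congrArg Char.toNat h2
  rw [Char.toNat_ofNat, Char.toNat_ofNat] at this
  have hva : (65 + a).isValidChar := Or.inl (by omega)
  have hvb : (65 + b).isValidChar := Or.inl (by omega)
  simp [hva, hvb] at this
  omega

lemma letters_items (n : Int) (hn : n ≤ 26) :
    (generate_letters n).items
      = (List.range n.toNat).map (fun k : Nat => (pvLetter (k : Int), ([] : List Int))) := by
  unfold generate_letters
  rw [PySem.List.pyRange_one, List.foldl_map]
  have hz : (n - 0).toNat = n.toNat := by omega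
  rw [hz]
  have h := PySem.Dict.items_foldl_insert_fresh (List.range n.toNat)
      (fun k => pvLetter ((0:Int) + (k:Int))) (fun _ => ([] : List Int)) PySem.Dict.empty
      (by intro a _; simp)
      (by
        apply List.Nodup.map_on _ (List.nodup_range)
        intro x hx y hy hxy
        simp only [List.mem_range] at hx hy
        have hx26 : x < 26 := by omega
        have hy26 : y < 26 := by omega
        exact letter_inj x y hx26 hy26 (by simpa using hxy))
  simp only [zero_add] at h ⊢
  rw [h]
  simp [PySem.Dict.empty]

lemma letters_keys (n : Int) (hn : n ≤ 26) :
    (generate_letters n).keys = (List.range n.toNat).map (fun k : Nat => pvLetter (k : Int)) := by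
  have : (generate_letters n).keys = (generate_letters n).items.map Prod.fst := rfl
  rw [this, letters_items n hn, List.map_map]
  rfl

lemma letters_getD (n : Int) (hn : n ≤ 26) (c : String) :
    (generate_letters n).getD c [] = [] := by
  rw [PySem.Dict.getD_eq_get?_getD]
  cases h : (generate_letters n).get? c with
  | none => rfl
  | some v =>
    have hm := PySem.Dict.mem_items_of_get?_eq_some _ h
    rw [letters_items n hn] at hm
    simp only [List.mem_map] at hm
    obtain ⟨k, -, hk⟩ := hm
    have : v = [] := by
      have := congrArg Prod.snd hk
      simpa using this.symm
    simp [this]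

lemma foldl_nested (P : List (Int × String)) (L : List Int) (g : Int → Int → Int)
    (d : PySem.Dict String (List Int)) :
    P.foldl (fun d p =>
        L.foldl (fun d i => d.modify p.2 [] (fun l => l ++ [g p.1 i])) d) d
      = (P.flatMap (fun p => L.map (fun i => (p.2, g p.1 i)))).foldl
          (fun d q => d.modify q.1 [] (fun l => l ++ [q.2])) d := by
  induction P generalizing d with
  | nil => rfl
  | cons a t ih => simp [List.foldl_append, List.foldl_map, ih]

lemma set_update_eq_self (ks l : List String) (h : ∀ x ∈ l, x ∈ ks) :
    PySem.Set.update ks l = ks := by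
  induction l generalizing ks with
  | nil => rfl
  | cons a t ih =>
    have ha : a ∈ ks := h a (by simp)
    have hadd : PySem.Set.add ks a = ks := by simp [PySem.Set.add, ha]
    simp only [PySem.Set.update, List.foldl_cons, hadd]
    exact ih ks (fun x hx => h x (by simp [hx]))

lemma enumerate_rev (m : Nat) :
    PySem.List.enumerate ((List.range m).map (fun k : Nat => pvLetter (k : Int))).reverse 0
      = (List.range m).map (fun j : Nat => ((j : Int), pvLetter (Int.ofNat (m - 1 - j)))) := by
  apply List.ext_getElem
  · simp [PySem.List.length_enumerate]
  · intro i h1 h2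
    rw [PySem.List.getElem_enumerate]
    rw [List.getElem_reverse]
    simp

lemma flatMap_single {α : Type} (m a : Nat) (ha : a < m) (B : Nat → List α)
    (h : ∀ j < m, j ≠ a → B j = []) : (List.range m).flatMap B = B a := by
  induction m with
  | zero => omega
  | succ k ih =>
    rw [List.range_succ, List.flatMap_append]
    by_cases hak : a = k
    · subst hak
      have hnil : (List.range a).flatMap B = [] := by
        apply List.flatMap_eq_nil_iff.mpr
        intro j hj
        simp only [List.mem_range] at hj
        exact h j (by omega) (by omega)
      simp [hnil]
    · have hk : B k = [] := h k (by omega) (fun e => hak e.symm)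
      rw [ih (by omega) (fun j hj hja => h j (by omega) hja)]
      simp [hk]

lemma gbit_cast (s k : Nat) : gbit ((s : Nat) : Int) ((k : Nat) : Int) = natBit s k := by
  unfold gbit natBit
  have h1 : ((s:Int)).toNat = s := by omega
  have h2 : ((s:Int) + 1).toNat = s + 1 := by omega
  rw [h1, h2]
  have h3 : (2:Int) ^ (s+1) = ((2 ^ (s+1) : Nat) : Int) := by push_cast; ring
  have h4 : (2:Int) ^ s = ((2 ^ s : Nat) : Int) := by push_cast; ring
  rw [h3, h4, PySem.Int.mod_natCast]
  split <;> split <;> first | rfl | (exfalso; omega)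

lemma map_gbit (s m : Nat) :
    (PySem.List.pyRange 0 ((2:Int) ^ m) 1).map (gbit (s : Int)) = natCol s (2 ^ m) := by
  rw [PySem.List.pyRange_one]
  have hz : ((2:Int) ^ m - 0).toNat = 2 ^ m := by
    rw [show (2:Int) ^ m - 0 = ((2 ^ m : Nat) : Int) by push_cast; ring, Int.toNat_natCast]
  rw [hz, List.map_map]
  unfold natCol
  apply List.map_congr_left
  intro k _
  simpa using gbit_cast s k

lemma natCol_head (m : Nat) :
    natCol m (2 ^ (m+1)) = List.replicate (2 ^ m) (0:Int) ++ List.replicate (2 ^ m) (1:Int) := by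
  unfold natCol
  rw [show 2 ^ (m+1) = 2 ^ m + 2 ^ m by ring, List.range_add, List.map_append, List.map_map]
  congr 1
  · rw [show (List.replicate (2 ^ m) (0:Int)) = (List.range (2 ^ m)).map (fun _ => (0:Int)) by
      rw [List.map_const', List.length_range]]
    apply List.map_congr_left
    intro k hk
    simp only [List.mem_range] at hk
    unfold natBit
    have h1 : k % 2 ^ (m+1) = k := Nat.mod_eq_of_lt (by have := Nat.pow_lt_pow_succ (a := 2) (n := m) (by omega); omega)
    rw [h1]
    simp
    omega
  · rw [show (List.replicate (2 ^ m) (1:Int)) = (List.range (2 ^ m)).map (fun _ => (1:Int)) by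
      rw [List.map_const', List.length_range]]
    apply List.map_congr_left
    intro k hk
    simp only [List.mem_range, Function.comp] at hk ⊢
    unfold natBit
    have h1 : (2 ^ m + k) % 2 ^ (m+1) = 2 ^ m + k := Nat.mod_eq_of_lt (by
      have : 2 ^ (m+1) = 2 ^ m + 2 ^ m := by ring
      omega)
    rw [h1]
    simp

lemma natCol_split (s m : Nat) (hs : s + 1 ≤ m) :
    natCol s (2 ^ (m+1)) = natCol s (2 ^ m) ++ natCol s (2 ^ m) := by
  unfold natCol
  rw [show 2 ^ (m+1) = 2 ^ m + 2 ^ m by ring, List.range_add, List.map_append, List.map_map]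
  congr 1
  apply List.map_congr_left
  intro k _
  simp only [Function.comp]
  unfold natBit
  obtain ⟨c, hc⟩ : 2 ^ (s+1) ∣ 2 ^ m := pow_dvd_pow 2 hs
  rw [hc, Nat.mul_add_mod]

lemma pvColumns_getElem (m p : Nat) (hp : p < m) :
    (pvColumns m)[p]'(by rw [pvColumns_length]; exact hp) = natCol (m - 1 - p) (2 ^ m) := by
  induction m generalizing p with
  | zero => omega
  | succ k ih =>
    cases p with
    | zero =>
      have ht : ((2:Int) ^ k).toNat = 2 ^ k := by
        rw [show (2:Int) ^ k = ((2 ^ k : Nat) : Int) by push_cast; ring, Int.toNat_natCast]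
      simp only [pvColumns, List.getElem_cons_zero, PySem.List.pyRepeat_singleton, ht]
      rw [show k + 1 - 1 - 0 = k by omega, natCol_head]
    | succ p' =>
      have hp' : p' < k := by omega
      simp only [pvColumns, List.getElem_cons_succ, List.getElem_map]
      rw [ih p' hp']
      rw [show k + 1 - 1 - (p' + 1) = k - 1 - p' by omega]
      exact (natCol_split (k - 1 - p') k (by omega)).symm

-- ===== VERDICT (by name: the statement is the Claim_ definition above) =====
theorem generate_spec : Claim_equal_generate := by
  intro n _ hpre
  unfold Spec_generate
  have hn : n ≤ 26 := hpre
  have hm26 : n.toNat ≤ 26 := by omega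
  have hA : generate n =
      ((PySem.List.enumerate (generate_letters n).keys.reverse 0).foldl
        (fun d p =>
          (PySem.List.pyRange 0 ((2:Int) ^ n.toNat) 1).foldl
            (fun d i => d.modify p.2 [] (fun l => l ++ [gbit p.1 i])) d)
        (generate_letters n)).items := rfl
  rw [letters_keys n hn, enumerate_rev n.toNat, foldl_nested, List.flatMap_map] at hA
  dsimp only at hA
  have hkeysF : (List.foldl (fun d q => d.modify q.1 [] fun l => l ++ [q.2]) (generate_letters n)
      (List.flatMap
        (fun a : Nat =>
          List.map (fun i => (pvLetter (Int.ofNat (n.toNat - 1 - a)), gbit (a : Int) i))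
            (PySem.List.pyRange 0 ((2:Int) ^ n.toNat) 1))
        (List.range n.toNat))).keys
      = (List.range n.toNat).map (fun k : Nat => pvLetter (k : Int)) := by
    rw [PySem.Dict.keys_foldl_modify_key _ Prod.fst [] (fun _ q => fun l => l ++ [q.2]) (generate_letters n)]
    rw [letters_keys n hn]
    apply set_update_eq_self
    intro x hx
    simp only [List.map_flatMap, List.mem_flatMap, List.mem_map, List.mem_range, List.map_map] at hx
    obtain ⟨j, hj, i, hi, rfl⟩ := hx
    simp only [List.mem_map, List.mem_range, Function.comp]
    exact ⟨n.toNat - 1 - j, by omega, by simp⟩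
  have hnodupF : ((List.range n.toNat).map (fun k : Nat => pvLetter (k : Int))).Nodup := by
    apply List.Nodup.map_on _ List.nodup_range
    intro x hx y hy hxy
    simp only [List.mem_range] at hx hy
    exact letter_inj x y (by omega) (by omega) hxy
  have hget : ∀ p : Nat, p < n.toNat →
      (List.foldl (fun d q => d.modify q.1 [] fun l => l ++ [q.2]) (generate_letters n)
        (List.flatMap
          (fun a : Nat =>
            List.map (fun i => (pvLetter (Int.ofNat (n.toNat - 1 - a)), gbit (a : Int) i))
              (PySem.List.pyRange 0 ((2:Int) ^ n.toNat) 1))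
          (List.range n.toNat))).getD (pvLetter (p : Int)) []
      = natCol (n.toNat - 1 - p) (2 ^ n.toNat) := by
    intro p hp
    rw [PySem.Dict.getD_foldl_modify_append _ (generate_letters n) (pvLetter (p : Int)),
        letters_getD n hn, List.filter_flatMap]
    rw [flatMap_single n.toNat (n.toNat - 1 - p) (by omega) _ ?hblocks]
    case hblocks =>
      intro j hj hne
      rw [List.filter_map]
      rw [List.filter_congr (q := fun _ => false) ?hfalse]
      · simp
      case hfalse =>
        intro i _
        simp only [Function.comp_apply, beq_eq_false_iff_ne, ne_eq]
        intro hEq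
        have : n.toNat - 1 - j = p := by
          apply letter_inj _ _ (by omega) (by omega)
          simpa using hEq
        omega
    · rw [show n.toNat - 1 - (n.toNat - 1 - p) = p from by omega]
      rw [List.filter_map]
      rw [List.filter_congr (q := fun _ => true) ?htrue]
      case htrue =>
        intro i _
        simp [Function.comp]
      rw [List.filter_true]
      rw [List.nil_append, List.map_map]
      rw [← map_gbit (n.toNat - 1 - p) n.toNat]
      apply List.map_congr_left
      intro i _
      simp [Function.comp]
  have hitems := PySem.Dict.items_eq_map_keys
      (List.foldl (fun d q => d.modify q.1 [] fun l => l ++ [q.2]) (generate_letters n)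
        (List.flatMap
          (fun a : Nat =>
            List.map (fun i => (pvLetter (Int.ofNat (n.toNat - 1 - a)), gbit (a : Int) i))
              (PySem.List.pyRange 0 ((2:Int) ^ n.toNat) 1))
          (List.range n.toNat)))
      (by rw [hkeysF]; exact hnodupF) ([] : List Int)
  rw [hkeysF] at hitems
  rw [hitems] at hA
  have hBkeys : (PySem.List.pyRange 0 n 1).map pvLetter
      = (List.range n.toNat).map (fun k : Nat => pvLetter (k : Int)) := by
    rw [PySem.List.pyRange_one, show (n - 0).toNat = n.toNat from by omega, List.map_map]
    apply List.map_congr_left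
    intro k _
    simp [Function.comp]
  have hB : generate_alt n
      = ((List.range n.toNat).map (fun k : Nat => pvLetter (k : Int))).zip (pvColumns n.toNat) := by
    show ((PySem.List.pyRange 0 n 1).map pvLetter).zip
        (pvColumns ((PySem.List.pyRange 0 n 1).map pvLetter).length) = _
    rw [hBkeys, List.length_map, List.length_range]
  rw [hA, hB, List.map_map]
  apply List.ext_getElem
  · simp [List.length_zip, pvColumns_length]
  · intro i h1 h2
    have him : i < n.toNat := by
      simpa [List.length_zip, pvColumns_length] using h2
    rw [List.getElem_zip, List.getElem_map, List.getElem_map, List.getElem_range]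
    simp only [Function.comp_apply]
    rw [pvColumns_getElem n.toNat i him, hget i him]
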